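-- pv_equiv track=rewrite | github.com/etijskens/wetppr | docs/make-glossary.py | process_title
-- ===== SOURCE A (Python) =====
-- def process_title(line: str) -> str:
--     """Take a text line with a title or subtitle, remove the leading '#'-characters, strip(), remove
--     punctation and replace spaces with hyphens, convert to lowercase and return the resulting string.
--     """
--     while line[0] == '#':
--         line = line[1:]
--     line = line.strip()
--     # remove punctuation:
--     t = line
--     for c in ".,?!'":
--         t = t.replace(c, '')
--     # replace spaces with hyphens
--     t = t.replace(' ', '-')
--     # convert to lowercase:
--     t = t.lower()
--
--     return t
-- ===== SOURCE B (Python) =====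
-- def process_title(line: str) -> str:
--     s = line.lstrip('#').strip()
--     return ''.join('-' if c == ' ' else c.lower() for c in s if c not in ".,?!'")
-- ===== Notes on version B (the rewrite author's own statement) =====
-- stated objective: simpler
-- what changed: B replaces A's character-stripping while-loop and four sequential full-string replace passes by lstrip('#') plus one single-pass generator join that skips punctuation, maps space to hyphen and lowercases each kept character.
-- outside the precondition, e.g. on process_title('#'): A raises IndexError, B returns ''; on process_title(''): A raises IndexError, B returns ''
-- crash fix: On inputs consisting entirely of '#' characters (including the empty string) A raises IndexError from line[0]; B returns the empty string. — e.g. on process_title("##"): A raises IndexError, B returns ""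
import Mathlib
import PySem

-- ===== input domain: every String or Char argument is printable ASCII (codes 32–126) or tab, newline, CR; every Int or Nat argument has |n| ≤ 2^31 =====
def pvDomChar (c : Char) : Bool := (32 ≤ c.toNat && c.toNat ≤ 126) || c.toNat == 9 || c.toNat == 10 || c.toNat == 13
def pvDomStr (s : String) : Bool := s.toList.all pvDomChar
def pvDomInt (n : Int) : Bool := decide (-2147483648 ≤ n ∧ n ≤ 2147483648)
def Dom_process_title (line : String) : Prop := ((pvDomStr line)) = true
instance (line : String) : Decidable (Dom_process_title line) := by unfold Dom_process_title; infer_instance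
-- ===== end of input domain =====

-- B replaces A's '#'-stripping while loop and five sequential replace passes by lstrip('#')
-- plus one single-pass join (skip punctuation, space→'-', lowercase); return-value equivalence on Pre_.


-- ===== PORT A =====
-- while line[0] == '#': line = line[1:]   ([] means Python raised IndexError; excluded by Pre_)
def ptWhileHash : List Char → List Char
  | [] => []
  | c :: cs => if c = '#' then ptWhileHash cs else c :: cs

def process_title (line : String) : String :=
  let l := PySem.Chars.strip (ptWhileHash line.toList)
  -- for c in ".,?!'": t = t.replace(c, '')
  let t := ".,?!'".toList.foldl (fun t c => PySem.Chars.replace t [c] []) l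
  let t := PySem.Chars.replace t [' '] ['-']
  String.mk (PySem.Chars.lower t)

-- ===== PORT B =====
-- s = line.lstrip('#').strip(); ''.join('-' if c==' ' else c.lower() for c in s if c not in ".,?!'")
def process_title_alt (line : String) : String :=
  let s := PySem.Chars.strip (line.toList.dropWhile (· == '#'))
  String.mk (s.filterMap (fun c =>
    if c ∈ ".,?!'".toList then none
    else some (if c = ' ' then '-' else PySem.Chars.lowerChar c)))

-- ===== PRECONDITION & SPEC =====
-- Pre_ excludes exactly the inputs made only of '#' (including ""), where A's line[0] raises IndexError.
def Pre_process_title (line : String) : Prop := (line.toList.any (fun c => c ≠ '#')) = true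
instance (line : String) : Decidable (Pre_process_title line) := by unfold Pre_process_title; infer_instance
def pvWitness_process_title : String := "# Hello, World!"

-- On inputs consisting entirely of '#' (including the empty string) A raises IndexError from line[0]; B returns "".
def Raises_process_title (line : String) : Prop := (line.toList.all (fun c => c = '#')) = true
instance (line : String) : Decidable (Raises_process_title line) := by unfold Raises_process_title; infer_instance
def pvRaiseWitness_process_title : String := "##"
def pvRaiseWitnessOut_process_title : String := ""

def Spec_process_title (line : String) (out : String) : Prop := out = process_title_alt line
instance (line : String) (out : String) : Decidable (Spec_process_title line out) := by unfold Spec_process_title; infer_instance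

-- ===== CLAIM (what is proved, stated in full; the proofs are below) =====
def Claim_equal_process_title : Prop := ∀ (line : String), Dom_process_title line → Pre_process_title line → Spec_process_title line (process_title line)
def Claim_raises_process_title : Prop := (∀ (line : String), Dom_process_title line → Raises_process_title line → ¬ Pre_process_title line) ∧ (Dom_process_title (pvRaiseWitness_process_title) ∧ Raises_process_title (pvRaiseWitness_process_title) ∧ process_title_alt (pvRaiseWitness_process_title) = pvRaiseWitnessOut_process_title)

-- ===== LEMMAS AND PROOFS =====

-- A's while-loop over line[0] computes dropWhile (· == '#') whenever the loop terminates normally.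
theorem ptWhileHash_eq_dropWhile (l : List Char) : ptWhileHash l = l.dropWhile (· == '#') := by
  induction l with
  | nil => rfl
  | cons c cs ih =>
    by_cases h : c = '#'
    · simp [ptWhileHash, h, ih, List.dropWhile]
    · have hb : (c == '#') = false := beq_eq_false_iff_ne.mpr h
      simp [ptWhileHash, h, ih, List.dropWhile, hb]

theorem replace_go_single (c : Char) (new : List Char) :
    ∀ (fuel : Nat) (l acc : List Char), l.length ≤ fuel →
      PySem.Chars.replace.go [c] new fuel l acc
        = acc.reverse ++ l.flatMap (fun x => if x = c then new else [x]) := by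
  intro fuel
  induction fuel with
  | zero => intro l acc h; simp at h; simp [h, PySem.Chars.replace.go]
  | succ n ih =>
    intro l acc h
    cases l with
    | nil => simp [PySem.Chars.replace.go]
    | cons x t =>
      by_cases hx : x = c
      · have : List.isPrefixOf [c] (x :: t) = true := by simp [List.isPrefixOf, hx]
        simp only [PySem.Chars.replace.go, this, if_pos]
        rw [ih]
        · simp [hx]
        · simpa using Nat.le_of_succ_le_succ h
      · have hpf : List.isPrefixOf [c] (x :: t) = false := by
          simp [List.isPrefixOf]; exact fun h' => hx h'.symm
        simp only [PySem.Chars.replace.go, hpf, Bool.false_eq_true, if_false]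
        rw [ih t (x :: acc) (by simpa using Nat.le_of_succ_le_succ h)]
        simp [hx]

-- single-character s.replace(c, new) is a per-character flatMap
theorem replace_single (s : List Char) (c : Char) (new : List Char) :
    PySem.Chars.replace s [c] new = s.flatMap (fun x => if x = c then new else [x]) := by
  rw [PySem.Chars.replace]
  simp [replace_go_single c new s.length s [] (le_refl _)]

-- the whole A-pipeline on an arbitrary char list equals B's single filterMap
theorem pipeline_eq (l : List Char) :
    PySem.Chars.lower
      (PySem.Chars.replace
        (".,?!'".toList.foldl (fun t c => PySem.Chars.replace t [c] []) l) [' '] ['-'])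
    = l.filterMap (fun c =>
        if c ∈ ".,?!'".toList then none
        else some (if c = ' ' then '-' else PySem.Chars.lowerChar c)) := by
  induction l with
  | nil => decide
  | cons c cs ih =>
    simp only [show (".,?!'".toList) = ['.', ',', '?', '!', '\''] from rfl, List.foldl] at *
    simp only [replace_single, List.flatMap_cons] at *
    by_cases h1 : c = '.' <;> by_cases h2 : c = ',' <;> by_cases h3 : c = '?' <;>
      by_cases h4 : c = '!' <;> by_cases h5 : c = '\'' <;>
      by_cases h6 : c = ' ' <;>
      simp_all [PySem.Chars.lower, show PySem.Chars.lowerChar '-' = '-' from rfl]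

-- ===== VERDICT (by name: the statement is the Claim_ definition above) =====
theorem process_title_spec : Claim_equal_process_title := by
  intro line _ hpre
  unfold Spec_process_title process_title process_title_alt
  rw [ptWhileHash_eq_dropWhile]
  simp only [pipeline_eq]

theorem process_title_raises : Claim_raises_process_title := by
  unfold Claim_raises_process_title
  refine ⟨?_, by decide⟩
  intro line _ hr hp
  unfold Raises_process_title at hr
  unfold Pre_process_title at hp
  simp only [List.all_eq_true, List.any_eq_true, decide_eq_true_eq] at hr hp
  obtain ⟨c, hc, hne⟩ := hp
  exact hne (hr c hc)

-- self-check: the raise-witness lies in Raises_ and B's port returns the stated literal there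
theorem pvRaiseWitness_ok : Dom_process_title pvRaiseWitness_process_title ∧ Raises_process_title pvRaiseWitness_process_title ∧ process_title_alt pvRaiseWitness_process_title = pvRaiseWitnessOut_process_title := process_title_raises.2
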